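-- pv_equiv track=rewrite | github.com/cgustin99/OpenParticle | QCD/hadron.py | pad_states
-- ===== SOURCE A (Python) =====
-- from collections import Counter
--
-- def pad_states(state, num_modes):
--     #pad quarks
--     padded_quarks = [1 if i in state[0] else 0 for i in range(num_modes)]
--     if padded_quarks == [0] * num_modes:
--         padded_quarks = []
--
--     #pad_antiquarks
--     padded_antiquarks = [1 if i in state[1] else 0 for i in range(num_modes)]
--     if padded_antiquarks == [0] * num_modes:
--         padded_antiquarks = []
--
--     #pad gluons
--     index_counts = Counter(state[2])
--     padded_gluons = [index_counts[i] if i in index_counts else 0 for i in range(num_modes)]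
--     if padded_gluons == [0] * num_modes:
--         padded_gluons = []
--
--
--
--     return [padded_quarks, padded_antiquarks, padded_gluons]
-- ===== SOURCE B (Python) =====
-- def _mark(indices, num_modes):
--     arr = [0] * num_modes
--     for i in indices:
--         if 0 <= i < num_modes:
--             arr[i] = 1
--     return arr if any(arr) else []
--
--
-- def _tally(indices, num_modes):
--     arr = [0] * num_modes
--     for i in indices:
--         if 0 <= i < num_modes:
--             arr[i] += 1
--     return arr if any(arr) else []
--
--
-- def pad_states(state, num_modes):
--     return [_mark(state[0], num_modes),
--             _mark(state[1], num_modes),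
--             _tally(state[2], num_modes)]
-- ===== Notes on version B (the rewrite author's own statement) =====
-- stated objective: faster
-- what changed: B scatters each sparse index list into a preallocated zero array (arr[i]=1 / arr[i]+=1 with a bounds guard) instead of scanning range(num_modes) with a membership test per position; the all-zero collapse becomes 'if any(arr)'.
import Mathlib
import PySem

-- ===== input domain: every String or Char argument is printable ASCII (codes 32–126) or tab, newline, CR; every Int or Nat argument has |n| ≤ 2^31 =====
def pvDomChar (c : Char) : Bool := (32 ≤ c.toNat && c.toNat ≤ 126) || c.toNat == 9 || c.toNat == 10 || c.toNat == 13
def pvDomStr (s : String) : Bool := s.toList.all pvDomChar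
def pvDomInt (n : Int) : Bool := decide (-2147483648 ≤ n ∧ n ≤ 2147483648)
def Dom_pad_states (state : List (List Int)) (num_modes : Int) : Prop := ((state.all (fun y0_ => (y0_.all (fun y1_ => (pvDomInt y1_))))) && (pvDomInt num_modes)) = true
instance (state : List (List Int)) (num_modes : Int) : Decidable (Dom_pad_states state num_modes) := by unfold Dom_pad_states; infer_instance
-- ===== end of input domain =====

-- B scatters each sparse index list into a preallocated zero array instead of scanning
-- range(num_modes) with a membership test per position (asymptotically fewer comparisons).

-- ===== PORT A =====
def pad_states (state : List (List Int)) (num_modes : Int) : List (List Int) :=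
  let q := PySem.List.pyGetD state 0 []
  let padded_quarks := (PySem.List.pyRange 0 num_modes 1).map (fun i => if i ∈ q then (1 : Int) else 0)
  let padded_quarks := if padded_quarks = List.replicate num_modes.toNat 0 then [] else padded_quarks
  let aq := PySem.List.pyGetD state 1 []
  let padded_antiquarks := (PySem.List.pyRange 0 num_modes 1).map (fun i => if i ∈ aq then (1 : Int) else 0)
  let padded_antiquarks := if padded_antiquarks = List.replicate num_modes.toNat 0 then [] else padded_antiquarks
  let index_counts := PySem.Dict.counter (PySem.List.pyGetD state 2 [])
  let padded_gluons := (PySem.List.pyRange 0 num_modes 1).map (fun i => if index_counts.contains i then index_counts.getD i 0 else 0)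
  let padded_gluons := if padded_gluons = List.replicate num_modes.toNat 0 then [] else padded_gluons
  [padded_quarks, padded_antiquarks, padded_gluons]

-- ===== PORT B =====
-- arr = [0]*num_modes; for i in indices: if 0 <= i < num_modes: arr[i] = 1; return arr if any(arr) else []
def padMark (indices : List Int) (num_modes : Int) : List Int :=
  let arr := indices.foldl (fun a i => if 0 ≤ i ∧ i < num_modes then a.set i.toNat 1 else a)
    (List.replicate num_modes.toNat (0 : Int))
  if arr.any (fun x => x != 0) then arr else []

-- same loop with arr[i] += 1
def padTally (indices : List Int) (num_modes : Int) : List Int :=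
  let arr := indices.foldl (fun a i => if 0 ≤ i ∧ i < num_modes then a.set i.toNat (a.getD i.toNat 0 + 1) else a)
    (List.replicate num_modes.toNat (0 : Int))
  if arr.any (fun x => x != 0) then arr else []

def pad_states_alt (state : List (List Int)) (num_modes : Int) : List (List Int) :=
  [padMark (PySem.List.pyGetD state 0 []) num_modes,
   padMark (PySem.List.pyGetD state 1 []) num_modes,
   padTally (PySem.List.pyGetD state 2 []) num_modes]

-- ===== PRECONDITION & SPEC =====
-- A indexes state[0], state[1], state[2]: it raises IndexError when state has fewer than 3 lists.
def Pre_pad_states (state : List (List Int)) (num_modes : Int) : Prop := 3 ≤ state.length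
instance (state : List (List Int)) (num_modes : Int) : Decidable (Pre_pad_states state num_modes) := by unfold Pre_pad_states; infer_instance
def pvWitness_pad_states : List (List Int) × Int := ([[0], [1], [0, 0]], 2)

def Spec_pad_states (state : List (List Int)) (num_modes : Int) (out : List (List Int)) : Prop := out = pad_states_alt state num_modes
instance (state : List (List Int)) (num_modes : Int) (out : List (List Int)) : Decidable (Spec_pad_states state num_modes out) := by unfold Spec_pad_states; infer_instance

-- ===== CLAIM (what is proved, stated in full; the proofs are below) =====
def Claim_equal_pad_states : Prop := ∀ (state : List (List Int)) (num_modes : Int), Dom_pad_states state num_modes → Pre_pad_states state num_modes → Spec_pad_states state num_modes (pad_states state num_modes)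

-- ===== LEMMAS AND PROOFS =====

theorem mark_length (n : Int) (l : List Int) (arr : List Int) :
    (l.foldl (fun a i => if 0 ≤ i ∧ i < n then a.set i.toNat 1 else a) arr).length = arr.length := by
  induction l generalizing arr with
  | nil => rfl
  | cons x xs ih =>
    simp only [List.foldl_cons]
    rw [ih]
    split <;> simp

theorem tally_length (n : Int) (l : List Int) (arr : List Int) :
    (l.foldl (fun a i => if 0 ≤ i ∧ i < n then a.set i.toNat (a.getD i.toNat 0 + 1) else a) arr).length = arr.length := by
  induction l generalizing arr with
  | nil => rfl
  | cons x xs ih =>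
    simp only [List.foldl_cons]
    rw [ih]
    split <;> simp

theorem mark_getD (n : Int) (l : List Int) (arr : List Int) (j : Nat) (hj : j < arr.length) :
    (l.foldl (fun a i => if 0 ≤ i ∧ i < n then a.set i.toNat 1 else a) arr).getD j 0
      = if (j : Int) ∈ l ∧ (j : Int) < n then 1 else arr.getD j 0 := by
  induction l generalizing arr with
  | nil => simp
  | cons x xs ih =>
    simp only [List.foldl_cons]
    have hlen : (if 0 ≤ x ∧ x < n then arr.set x.toNat 1 else arr).length = arr.length := by
      split <;> simp
    rw [ih _ (by omega)]
    have hstep : (if 0 ≤ x ∧ x < n then arr.set x.toNat 1 else arr).getD j 0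
        = if x = (j : Int) ∧ (j : Int) < n then 1 else arr.getD j 0 := by
      by_cases hc : 0 ≤ x ∧ x < n
      · rw [if_pos hc]
        by_cases hx : x = (j : Int)
        · have hxt : x.toNat = j := by omega
          rw [hxt, List.getD_eq_getElem _ _ (by simpa using hj), if_pos ⟨hx, by omega⟩]
          simp [hj]
        · have hxt : x.toNat ≠ j := by omega
          rw [List.getD_eq_getElem _ _ (by simpa using hj), List.getElem_set_ne hxt,
            if_neg (by tauto), ← List.getD_eq_getElem _ _ hj]
      · rw [if_neg hc, if_neg (by omega)]
    rw [hstep]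
    by_cases h1 : (j : Int) < n
    · simp only [h1, and_true, List.mem_cons]
      by_cases h2 : (j : Int) ∈ xs
      · simp [h2]
      · simp only [h2, if_false]
        by_cases h3 : x = (j : Int)
        · simp [h3]
        · have hjx : ¬((j : Int) = x) := fun h => h3 h.symm
          simp [h3, hjx]
    · simp [h1]

theorem tally_getD (n : Int) (l : List Int) (arr : List Int) (j : Nat) (hj : j < arr.length)
    (hn : (j : Int) < n) :
    (l.foldl (fun a i => if 0 ≤ i ∧ i < n then a.set i.toNat (a.getD i.toNat 0 + 1) else a) arr).getD j 0
      = arr.getD j 0 + l.count (j : Int) := by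
  induction l generalizing arr with
  | nil => simp
  | cons x xs ih =>
    simp only [List.foldl_cons]
    have hlen : (if 0 ≤ x ∧ x < n then arr.set x.toNat (arr.getD x.toNat 0 + 1) else arr).length = arr.length := by
      split <;> simp
    rw [ih _ (by omega)]
    have hstep : (if 0 ≤ x ∧ x < n then arr.set x.toNat (arr.getD x.toNat 0 + 1) else arr).getD j 0
        = arr.getD j 0 + (if x = (j : Int) then 1 else 0) := by
      by_cases hx : x = (j : Int)
      · have hc : 0 ≤ x ∧ x < n := by omega
        rw [if_pos hc]
        have hxt : x.toNat = j := by omega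
        rw [hxt, List.getD_eq_getElem _ _ (by simpa using hj)]
        simp [hj, hx, List.getD_eq_getElem _ _ hj]
      · by_cases hc : 0 ≤ x ∧ x < n
        · rw [if_pos hc]
          have hxt : x.toNat ≠ j := by omega
          rw [List.getD_eq_getElem _ _ (by simpa using hj), List.getElem_set_ne hxt,
            List.getD_eq_getElem arr _ hj]
          simp [hx]
        · rw [if_neg hc]
          simp [hx]
    rw [hstep, List.count_cons]
    by_cases hx : x = (j : Int)
    · simp only [hx, if_pos rfl, beq_self_eq_true]
      push_cast
      ring
    · have hjx : ¬((j : Int) = x) := fun h => hx h.symm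
      simp [hx, hjx]

theorem mark_eq_map (l : List Int) (n : Int) :
    (PySem.List.pyRange 0 n 1).map (fun i => if i ∈ l then (1 : Int) else 0)
      = l.foldl (fun a i => if 0 ≤ i ∧ i < n then a.set i.toNat 1 else a)
          (List.replicate n.toNat (0 : Int)) := by
  apply List.ext_getElem
  · rw [List.length_map, PySem.List.length_pyRange_one, mark_length, List.length_replicate]
    simp
  · intro k h1 h2
    have hk : k < n.toNat := by
      rw [List.length_map, PySem.List.length_pyRange_one] at h1
      omega
    have hkn : (k : Int) < n := by omega
    rw [List.getElem_map, PySem.List.getElem_pyRange_one]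
    rw [← List.getD_eq_getElem _ 0 h2]
    rw [mark_getD n l _ k (by simpa using hk)]
    simp only [zero_add]
    by_cases hm : (k : Int) ∈ l
    · simp [hm, hkn]
    · simp [hm]

theorem tally_eq_map (l : List Int) (n : Int) :
    (PySem.List.pyRange 0 n 1).map (fun i => if (PySem.Dict.counter l).contains i then (PySem.Dict.counter l).getD i 0 else 0)
      = l.foldl (fun a i => if 0 ≤ i ∧ i < n then a.set i.toNat (a.getD i.toNat 0 + 1) else a)
          (List.replicate n.toNat (0 : Int)) := by
  apply List.ext_getElem
  · rw [List.length_map, PySem.List.length_pyRange_one, tally_length, List.length_replicate]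
    simp
  · intro k h1 h2
    have hk : k < n.toNat := by
      rw [List.length_map, PySem.List.length_pyRange_one] at h1
      omega
    have hkn : (k : Int) < n := by omega
    rw [List.getElem_map, PySem.List.getElem_pyRange_one]
    rw [← List.getD_eq_getElem _ 0 h2]
    rw [tally_getD n l _ k (by simpa using hk) hkn]
    simp only [zero_add, List.getD_replicate]
    by_cases hm : (k : Int) ∈ l
    · simp [PySem.Dict.contains_counter, hm, PySem.Dict.getD_counter]
    · have hz : l.count ((k : Int)) = 0 := by
        rw [List.count_eq_zero]
        simpa using hm
      simp [PySem.Dict.contains_counter, hm, hz]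

theorem pv_collapse (m : List Int) (n : Int) (hl : m.length = n.toNat) :
    (if m = List.replicate n.toNat 0 then ([] : List Int) else m)
      = (if m.any (fun x => x != 0) then m else []) := by
  by_cases h : m = List.replicate n.toNat 0
  · subst h
    simp
  · rw [if_neg h]
    have : m.any (fun x => x != 0) = true := by
      by_contra hna
      apply h
      rw [List.eq_replicate_iff]
      refine ⟨hl, fun b hb => ?_⟩
      simp only [List.any_eq_true, bne_iff_ne] at hna
      push_neg at hna
      exact hna b hb
    rw [if_pos this]

-- ===== VERDICT (by name: the statement is the Claim_ definition above) =====
theorem pad_states_spec : Claim_equal_pad_states := by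
  intro state num_modes _hdom _hpre
  unfold Spec_pad_states pad_states pad_states_alt padMark padTally
  simp only []
  refine congrArg₂ _ ?_ (congrArg₂ _ ?_ (congrArg₂ _ ?_ rfl))
  · rw [mark_eq_map, pv_collapse]
    rw [mark_length]; simp
  · rw [mark_eq_map, pv_collapse]
    rw [mark_length]; simp
  · rw [tally_eq_map, pv_collapse]
    rw [tally_length]; simp
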